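-- pv_equiv track=rewrite | github.com/smeetrs/deep_avsr | video/data_checks.py | required_input_length
-- ===== SOURCE A (Python) =====
-- def required_input_length(string):
--     reqLen = len(string)
--     lastChar = string[0]
--     for i in range(1, len(string)):
--         if string[i] != lastChar:
--             lastChar = string[i]
--         else:
--             reqLen = reqLen + 1
--     return reqLen
-- ===== SOURCE B (Python) =====
-- def required_input_length(string):
--     # Count maximal runs of equal characters by skipping over each run,
--     # then return 2*len(string) - runs (adjacent equal pairs = len - runs).
--     n = len(string)
--     runs = 0
--     i = 0
--     while i < n:
--         c = string[i]
--         while i < n and string[i] == c: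
--             i += 1
--         runs += 1
--     return 2 * n - runs
-- ===== Notes on version B (the rewrite author's own statement) =====
-- stated objective: alternative
-- what changed: Replaces the stateful pairwise lastChar comparison loop by run-skipping: an outer loop advances over each maximal run of equal characters to count the runs, and the result is the closed form 2*len(string) - runs.
-- crash fix: A raises IndexError on the empty string (it reads string[0]); B naturally returns 0 there. — e.g. on required_input_length(""): A raises IndexError, B returns 0
import Mathlib
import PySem

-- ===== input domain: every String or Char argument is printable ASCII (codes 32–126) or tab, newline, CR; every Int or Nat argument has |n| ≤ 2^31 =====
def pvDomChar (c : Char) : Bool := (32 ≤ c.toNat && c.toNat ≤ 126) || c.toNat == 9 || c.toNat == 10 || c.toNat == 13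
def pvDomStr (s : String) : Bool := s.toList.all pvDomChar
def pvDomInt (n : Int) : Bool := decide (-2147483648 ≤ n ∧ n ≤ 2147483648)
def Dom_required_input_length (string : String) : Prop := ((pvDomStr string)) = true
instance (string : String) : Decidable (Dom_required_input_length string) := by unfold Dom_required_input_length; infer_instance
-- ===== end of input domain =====

-- B counts the maximal runs of equal characters by skipping over each run and
-- returns 2*len - runs, instead of A's stateful pairwise lastChar loop
-- (objective: alternative).

-- ===== PORT A =====
def required_input_length (string : String) : Int :=
  let cs := string.toList
  match PySem.List.pyGet? cs 0 with
  | none => 0   -- string[0] raises IndexError in Python; excluded by Pre_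
  | some c0 =>
    ((PySem.List.pyRange 1 (cs.length : Int) 1).foldl
      (fun (st : Char × Int) i =>
        let c := PySem.List.pyGetD cs i c0
        if c ≠ st.1 then (c, st.2) else (st.1, st.2 + 1))
      (c0, (cs.length : Int))).2

-- ===== PORT B =====
-- inner while loop of Source B: skip the current run (dropWhile); outer loop: one
-- recursive step per run, counting it.
def pvCountRuns : List Char → Int
  | [] => 0
  | c :: t => 1 + pvCountRuns (t.dropWhile (fun x => x == c))
termination_by l => l.length
decreasing_by
  simp only [List.length_cons]
  exact Nat.lt_succ_of_le (List.length_dropWhile_le _ _)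

def required_input_length_alt (string : String) : Int :=
  2 * (string.toList.length : Int) - pvCountRuns string.toList

-- ===== PRECONDITION & SPEC =====
-- Pre_ excludes only the empty string, on which A raises IndexError (string[0]).
def Pre_required_input_length (string : String) : Prop := string ≠ ""
instance (string : String) : Decidable (Pre_required_input_length string) := by unfold Pre_required_input_length; infer_instance
def pvWitness_required_input_length : String := "aab"

-- A raises IndexError on the empty string (it reads string[0]); B naturally returns 0 there.
def Raises_required_input_length (string : String) : Prop := string = ""
instance (string : String) : Decidable (Raises_required_input_length string) := by unfold Raises_required_input_length; infer_instance
def pvRaiseWitness_required_input_length : String := ""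
def pvRaiseWitnessOut_required_input_length : Int := 0

def Spec_required_input_length (string : String) (out : Int) : Prop := out = required_input_length_alt string
instance (string : String) (out : Int) : Decidable (Spec_required_input_length string out) := by unfold Spec_required_input_length; infer_instance

-- ===== CLAIM (what is proved, stated in full; the proofs are below) =====
def Claim_equal_required_input_length : Prop := ∀ (string : String), Dom_required_input_length string → Pre_required_input_length string → Spec_required_input_length string (required_input_length string)
def Claim_raises_required_input_length : Prop := (∀ (string : String), Dom_required_input_length string → Raises_required_input_length string → ¬ Pre_required_input_length string) ∧ (Dom_required_input_length (pvRaiseWitness_required_input_length) ∧ Raises_required_input_length (pvRaiseWitness_required_input_length) ∧ required_input_length_alt (pvRaiseWitness_required_input_length) = pvRaiseWitnessOut_required_input_length)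

-- ===== LEMMAS AND PROOFS =====

-- appending an equal character to the front of a run does not change the run count
lemma pvCountRuns_cons_self (c : Char) (t : List Char) :
    pvCountRuns (c :: c :: t) = pvCountRuns (c :: t) := by
  rw [pvCountRuns, pvCountRuns]
  simp [List.dropWhile]

-- A's loop body over the tail, with last-seen char lc and running count acc,
-- computes acc + |rest| + 1 - (number of runs of lc :: rest).
lemma rloop_runs (rest : List Char) (lc : Char) (acc : Int) :
    (rest.foldl
      (fun (st : Char × Int) c => if c ≠ st.1 then (c, st.2) else (st.1, st.2 + 1))
      (lc, acc)).2
    = acc + (rest.length : Int) + 1 - pvCountRuns (lc :: rest) := by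
  induction rest generalizing lc acc with
  | nil => simp [pvCountRuns]
  | cons c t ih =>
    by_cases h : c = lc
    · subst h
      simp only [List.foldl_cons]
      rw [if_neg (by simp), ih, pvCountRuns_cons_self]
      simp
      omega
    · simp only [List.foldl_cons]
      rw [if_pos h, ih]
      have : pvCountRuns (lc :: c :: t) = 1 + pvCountRuns (c :: t) := by
        conv_lhs => rw [pvCountRuns]
        simp [List.dropWhile, show (c == lc) = false from by simp [h]]
      rw [this]
      simp
      omega

theorem required_input_length_spec : Claim_equal_required_input_length := by
  intro string _ hpre
  unfold Spec_required_input_length required_input_length required_input_length_alt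
  have hne : string.toList ≠ [] := by
    intro h
    exact hpre (by rwa [String.toList_eq_nil_iff] at h)
  obtain ⟨c0, rest, hcons⟩ := List.exists_cons_of_ne_nil hne
  simp only [hcons]
  rw [PySem.List.pyGet?_zero_cons]
  dsimp only
  rw [PySem.List.foldl_pyRange_pyGetD' (c0 :: rest) c0
        (fun (st : Char × Int) c => if c ≠ st.1 then (c, st.2) else (st.1, st.2 + 1))
        (c0, ((c0 :: rest).length : Int)) (a := 1) (by norm_num)]
  simp only [Int.toNat_one, List.drop_one, List.tail_cons]
  rw [rloop_runs]
  simp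
  omega

def required_input_length_raises : Claim_raises_required_input_length := by
  unfold Claim_raises_required_input_length
  refine ⟨fun s _ hr => by simp [Raises_required_input_length, Pre_required_input_length] at hr ⊢; exact hr, by decide, by decide, ?_⟩
  show required_input_length_alt "" = 0
  rw [required_input_length_alt]
  norm_num [show ("" : String).toList = [] from rfl, pvCountRuns]
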